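-- pv_equiv track=rewrite | github.com/czy12345github/trace_prediction | preprocess/process3.py | traces_map
-- ===== SOURCE A (Python) =====
-- from collections import defaultdict
--
-- def get_sc_occurrence(traces):
--     sc_occurrence = defaultdict(lambda: 0)
--
--     for trace in traces:
--         for point in trace:
--             sc_occurrence[point[0]] += 1
--     return sc_occurrence
--
-- def traces_map(traces):
--     smallcell_index = {}
--
--     i = 1
--     for x in get_sc_occurrence(traces).keys():
--         smallcell_index[x] = i
--         i += 1
--
--     new_traces = []
--     for trace in traces:
--         new_trace = []
--         for point in trace:
--             new_trace.append((smallcell_index[point[0]],point[1]))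
--         new_traces.append(new_trace)
--
--     index_smallcell = []
--     for i in range(len(smallcell_index.keys())):
--         for x in smallcell_index.keys():
--             if smallcell_index[x] == i+1:
--                 index_smallcell.append(x)
--                 break
--
--     return index_smallcell, new_traces
-- ===== SOURCE B (Python) =====
-- def traces_map(traces):
--     mapping = {}
--     index_smallcell = []
--     new_traces = []
--     for trace in traces:
--         new_trace = []
--         for point in trace:
--             sc = point[0]
--             if sc not in mapping:
--                 index_smallcell.append(sc)
--                 mapping[sc] = len(index_smallcell)
--             new_trace.append((mapping[sc], point[1]))
--         new_traces.append(new_trace)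
--     return index_smallcell, new_traces
-- ===== Notes on version B (the rewrite author's own statement) =====
-- stated objective: simpler
-- what changed: A's four phases (occurrence-count dict, separate 1-based enumeration of its keys, remapping pass, and an O(k^2) reverse-lookup scan to rebuild the ordered id list) are replaced by one merged pass over the traces that maintains the ordered id table and the id->index mapping together, so the count dict and the reverse scan disappear.
import Mathlib
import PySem

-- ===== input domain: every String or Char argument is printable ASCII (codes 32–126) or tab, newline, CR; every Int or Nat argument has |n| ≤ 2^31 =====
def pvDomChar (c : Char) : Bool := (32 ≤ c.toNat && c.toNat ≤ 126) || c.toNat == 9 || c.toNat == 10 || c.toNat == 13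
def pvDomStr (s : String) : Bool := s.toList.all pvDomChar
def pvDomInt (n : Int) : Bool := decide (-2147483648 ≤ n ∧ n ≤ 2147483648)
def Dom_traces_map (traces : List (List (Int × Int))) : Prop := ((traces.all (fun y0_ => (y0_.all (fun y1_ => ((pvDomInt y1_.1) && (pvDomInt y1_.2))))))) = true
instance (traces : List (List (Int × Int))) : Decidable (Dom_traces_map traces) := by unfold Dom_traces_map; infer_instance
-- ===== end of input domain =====

-- B replaces A's count-dict + enumeration + O(n^2) reverse-index scan by one merged pass
-- that maintains the ordered id table and the remapping dict together (objective: simpler).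

-- ===== PORT A =====
def get_sc_occurrence (traces : List (List (Int × Int))) : PySem.Dict Int Int :=
  traces.foldl (fun d trace => trace.foldl (fun d point => d.modify point.1 0 (· + 1)) d)
    PySem.Dict.empty

def traces_map (traces : List (List (Int × Int))) : List Int × (List (List (Int × Int))) :=
  -- smallcell_index = {}; i = 1; for x in keys: smallcell_index[x] = i; i += 1
  let smallcell_index :=
    ((get_sc_occurrence traces).keys.foldl
      (fun (st : PySem.Dict Int Int × Int) x => (st.1.insert x st.2, st.2 + 1))
      (PySem.Dict.empty, 1)).1
  -- smallcell_index[point[0]]: the key is always present (every point's id was counted),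
  -- so the getD default never fires and this is Python's d[k]
  let new_traces := traces.map (fun trace =>
    trace.map (fun point => (smallcell_index.getD point.1 0, point.2)))
  -- for i in range(len(keys)): for x in keys: if smallcell_index[x] == i+1: append x; break
  -- (the inner scan-with-break is List.find?; nothing is appended when no key matches)
  let index_smallcell :=
    (PySem.List.pyRange 0 (smallcell_index.size : Int)).foldl
      (fun acc i =>
        match smallcell_index.keys.find? (fun x => smallcell_index.getD x 0 == i + 1) with
        | some x => acc ++ [x]
        | none => acc) []
  (index_smallcell, new_traces)

-- ===== PORT B =====
-- inner loop body of Source B: state = (mapping, index_smallcell, new_trace)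
def tm_point_step (s : PySem.Dict Int Int × List Int × List (Int × Int)) (point : Int × Int) :
    PySem.Dict Int Int × List Int × List (Int × Int) :=
  let sc := point.1
  let (m, idx) :=
    if s.1.contains sc then (s.1, s.2.1)
    else (s.1.insert sc ((s.2.1.length : Int) + 1), s.2.1 ++ [sc])
  (m, idx, s.2.2 ++ [(m.getD sc 0, point.2)])

-- outer loop body of Source B: state = (mapping, index_smallcell, new_traces)
def tm_trace_step (st : PySem.Dict Int Int × List Int × List (List (Int × Int)))
    (trace : List (Int × Int)) : PySem.Dict Int Int × List Int × List (List (Int × Int)) :=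
  let inner := trace.foldl tm_point_step (st.1, st.2.1, [])
  (inner.1, inner.2.1, st.2.2 ++ [inner.2.2])

def traces_map_alt (traces : List (List (Int × Int))) : List Int × (List (List (Int × Int))) :=
  let r := traces.foldl tm_trace_step (PySem.Dict.empty, [], [])
  (r.2.1, r.2.2)

-- ===== PRECONDITION & SPEC =====
def Spec_traces_map (traces : List (List (Int × Int))) (out : List Int × (List (List (Int × Int)))) : Prop := out = traces_map_alt traces
instance (traces : List (List (Int × Int))) (out : List Int × (List (List (Int × Int)))) : Decidable (Spec_traces_map traces out) := by unfold Spec_traces_map; infer_instance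

-- ===== CLAIM (what is proved, stated in full; the proofs are below) =====
def Claim_equal_traces_map : Prop := ∀ (traces : List (List (Int × Int))), Dom_traces_map traces → Spec_traces_map traces (traces_map traces)

-- ===== LEMMAS AND PROOFS =====

-- the 1-based index of id k in the ordered id table K
def pvIdx (K : List Int) (k : Int) : Int := (K.idxOf k : Int) + 1

-- the ordered table of first-occurring ids, common spec of both ports
def pvKeys (traces : List (List (Int × Int))) : List Int :=
  PySem.Set.ofList ((traces.flatMap id).map Prod.fst)

-- invariant tying a mapping dict to the id table built so far
def pvInv (m : PySem.Dict Int Int) (I : List Int) : Prop :=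
  I.Nodup ∧ m.keys = I ∧ ∀ k ∈ I, m.getD k 0 = pvIdx I k

theorem pv_foldl_flatten {α β : Type} (l : List (List α)) (g : β → α → β) (init : β) :
    l.foldl (fun x e => e.foldl g x) init = (l.flatMap id).foldl g init := by
  induction l generalizing init <;> simp_all

theorem pvIdx_append_of_mem {k : Int} {I : List Int} (J : List Int) (h : k ∈ I) :
    pvIdx (I ++ J) k = pvIdx I k := by
  simp [pvIdx, List.idxOf_append_of_mem h]

theorem pvInv_empty : pvInv PySem.Dict.empty ([] : List Int) := by
  refine ⟨List.nodup_nil, by simp [pysem], by simp⟩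

theorem pvInv_extend {m : PySem.Dict Int Int} {I : List Int} {x : Int}
    (h : pvInv m I) (hx : x ∉ I) :
    pvInv (m.insert x ((I.length : Int) + 1)) (I ++ [x]) := by
  obtain ⟨hnd, hkeys, hval⟩ := h
  have hc : m.contains x = false := by
    rw [PySem.Dict.contains_eq_decide_mem_keys, hkeys]; simpa using hx
  refine ⟨by simp only [List.nodup_append]; exact ⟨hnd, List.nodup_singleton x, fun a ha b hb => fun e => hx ((List.mem_singleton.mp hb ▸ e) ▸ ha)⟩, ?_, ?_⟩
  · rw [PySem.Dict.keys_insert_of_not_contains m _ hc, hkeys]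
  · intro k hk
    rcases List.mem_append.mp hk with hkI | hkx
    · have hne : k ≠ x := fun e => hx (e ▸ hkI)
      rw [PySem.Dict.getD_insert_of_ne m _ _ hne, hval k hkI, pvIdx_append_of_mem [x] hkI]
    · have hkx' : k = x := by simpa using hkx
      subst hkx'
      rw [PySem.Dict.getD_insert_self]
      simp [pvIdx, List.idxOf_append, hx]

theorem pv_assignFold : ∀ (K I : List Int) (m : PySem.Dict Int Int), pvInv m I →
    (I ++ K).Nodup →
    pvInv ((K.foldl (fun st x => (st.1.insert x st.2, st.2 + 1)) (m, (I.length : Int) + 1)).1)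
      (I ++ K) := by
  intro K
  induction K with
  | nil => intro I m h _; simpa using h
  | cons x K ih =>
    intro I m h hnd
    have hx : x ∉ I := by
      intro hmem
      rw [List.nodup_append] at hnd
      exact hnd.2.2 x hmem x List.mem_cons_self rfl
    have h' := pvInv_extend h hx
    have hnd' : ((I ++ [x]) ++ K).Nodup := by simpa using hnd
    have := ih (I ++ [x]) (m.insert x ((I.length : Int) + 1)) h' hnd'
    have hlen : ((I ++ [x]).length : Int) + 1 = (I.length : Int) + 1 + 1 := by
      simp
    rw [hlen] at this
    simpa using this

theorem pv_find_shift : ∀ (K : List Int) (g : Int → Int) (c : Int),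
    (∀ j (hj : j < K.length), g K[j] = (j : Int) + c) →
    ∀ i (_ : i < K.length), K.find? (fun x => g x == (i : Int) + c) = some (K.getD i 0) := by
  intro K
  induction K with
  | nil => intro g c _ i hi; simp at hi
  | cons k K ih =>
    intro g c hg i hi
    have hk : g k = c := by simpa using hg 0 (by simp)
    cases i with
    | zero => simp [List.find?, hk]
    | succ i =>
      have hns : ¬ (g k = (↑(i + 1) : Int) + c) := by
        intro e; rw [hk] at e; push_cast at e; omega
      have hrec := ih g (c + 1) (fun j hj => by
        have h2 := hg (j + 1) (by simpa using Nat.succ_lt_succ hj)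
        simp only [List.getElem_cons_succ] at h2
        rw [h2]; omega) i (by simpa using Nat.lt_of_succ_lt_succ hi)
      have harg : ((i : Int) + (c + 1)) = (↑(i + 1) : Int) + c := by push_cast; ring
      rw [harg] at hrec
      rw [List.find?_cons_of_neg (by simpa using hns), List.getD_cons_succ]
      exact hrec

theorem pv_range_getD (K : List Int) :
    (List.range K.length).map (fun i => K.getD i 0) = K := by
  apply List.ext_getElem
  · simp
  · intro i h1 h2
    simp [List.getD_eq_getElem?_getD]
    rw [List.getElem?_eq_getElem] <;> simp_all

theorem pv_A_eq_spec (traces : List (List (Int × Int))) :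
    traces_map traces =
      (pvKeys traces,
       traces.map (fun tr => tr.map (fun p => (pvIdx (pvKeys traces) p.1, p.2)))) := by
  have hkeys : (get_sc_occurrence traces).keys = pvKeys traces := by
    unfold get_sc_occurrence
    rw [pv_foldl_flatten]
    rw [PySem.Dict.keys_foldl_modify_key ((traces.flatMap id)) Prod.fst 0
      (fun _ _ => (· + 1)) PySem.Dict.empty]
    simp [pvKeys, PySem.Set.update_nil_left]
  have hnodupK : (pvKeys traces).Nodup := PySem.Set.nodup_ofList _
  have hinvD : pvInv
      (((get_sc_occurrence traces).keys.foldl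
        (fun (st : PySem.Dict Int Int × Int) x => (st.1.insert x st.2, st.2 + 1))
        (PySem.Dict.empty, 1)).1) (pvKeys traces) := by
    have h := pv_assignFold (pvKeys traces) [] PySem.Dict.empty pvInv_empty
      (by simpa using hnodupK)
    simp only [List.nil_append, List.length_nil, Nat.cast_zero, zero_add] at h
    rw [hkeys]
    exact h
  unfold traces_map
  dsimp only
  obtain ⟨hndK, hDkeys, hDval⟩ := hinvD
  have hmemK : ∀ tr ∈ traces, ∀ p ∈ tr, p.1 ∈ pvKeys traces := by
    intro tr htr p hp
    rw [pvKeys, PySem.Set.mem_ofList]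
    exact List.mem_map_of_mem (List.mem_flatMap.mpr ⟨tr, htr, hp⟩)
  have h2 : traces.map (fun trace => trace.map (fun point =>
        ((((get_sc_occurrence traces).keys.foldl
          (fun (st : PySem.Dict Int Int × Int) x => (st.1.insert x st.2, st.2 + 1))
          (PySem.Dict.empty, 1)).1).getD point.1 0, point.2)))
      = traces.map (fun tr => tr.map (fun p => (pvIdx (pvKeys traces) p.1, p.2))) := by
    apply List.map_congr_left
    intro tr htr
    apply List.map_congr_left
    intro p hp
    rw [hDval p.1 (hmemK tr htr p hp)]
  rw [h2]
  have hsize : ((((get_sc_occurrence traces).keys.foldl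
      (fun (st : PySem.Dict Int Int × Int) x => (st.1.insert x st.2, st.2 + 1))
      (PySem.Dict.empty, 1)).1).size : Int) = ((pvKeys traces).length : Int) := by
    rw [← hDkeys]
    simp [PySem.Dict.size, PySem.Dict.keys]
  rw [hsize, PySem.List.pyRange_zero_natCast, List.foldl_map]
  have h3 : ∀ (acc : List Int), ∀ i ∈ List.range (pvKeys traces).length,
      (match (((get_sc_occurrence traces).keys.foldl
          (fun (st : PySem.Dict Int Int × Int) x => (st.1.insert x st.2, st.2 + 1))
          (PySem.Dict.empty, 1)).1).keys.find?
          (fun x => (((get_sc_occurrence traces).keys.foldl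
            (fun (st : PySem.Dict Int Int × Int) x => (st.1.insert x st.2, st.2 + 1))
            (PySem.Dict.empty, 1)).1).getD x 0 == (i : Int) + 1) with
        | some x => acc ++ [x]
        | none => acc)
      = acc ++ [(pvKeys traces).getD i 0] := by
    intro acc i hi
    have hi' : i < (pvKeys traces).length := List.mem_range.mp hi
    have hfind := pv_find_shift (pvKeys traces)
      (fun x => (((get_sc_occurrence traces).keys.foldl
        (fun (st : PySem.Dict Int Int × Int) x => (st.1.insert x st.2, st.2 + 1))
        (PySem.Dict.empty, 1)).1).getD x 0) 1
      (fun j hj => by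
        dsimp only
        rw [hDval _ (List.getElem_mem hj), pvIdx,
          List.Nodup.idxOf_getElem hndK j hj])
      i hi'
    rw [hDkeys, hfind]
  rw [PySem.List.foldl_congr_mem (List.range (pvKeys traces).length) _
    (fun acc i => acc ++ [(pvKeys traces).getD i 0]) [] h3]
  rw [PySem.List.foldl_append_singleton_eq_map, pv_range_getD]
  simp

theorem pv_B_inner (tr : List (Int × Int)) :
    ∀ (m : PySem.Dict Int Int) (I : List Int) (nt : List (Int × Int)), pvInv m I →
    ∃ m', tr.foldl tm_point_step (m, I, nt) =
        (m', PySem.Set.update I (tr.map Prod.fst),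
         nt ++ tr.map (fun p => (pvIdx (PySem.Set.update I (tr.map Prod.fst)) p.1, p.2))) ∧
      pvInv m' (PySem.Set.update I (tr.map Prod.fst)) := by
  induction tr with
  | nil =>
    intro m I nt h
    exact ⟨m, by simp [PySem.Set.update_nil], by simpa [PySem.Set.update_nil] using h⟩
  | cons p tr ih =>
    intro m I nt h
    obtain ⟨hnd, hkeys, hval⟩ := h
    by_cases hmem : p.1 ∈ I
    · have hc : m.contains p.1 = true := by
        rw [PySem.Dict.contains_eq_decide_mem_keys, hkeys]; simpa
      have hstep : tm_point_step (m, I, nt) p = (m, I, nt ++ [(m.getD p.1 0, p.2)]) := by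
        simp [tm_point_step, hc]
      obtain ⟨m', heq, hinv⟩ := ih m I (nt ++ [(m.getD p.1 0, p.2)]) ⟨hnd, hkeys, hval⟩
      have hU : PySem.Set.update I ((p :: tr).map Prod.fst)
          = PySem.Set.update I (tr.map Prod.fst) := by
        simp [PySem.Set.update_cons, PySem.Set.add_of_mem hmem]
      refine ⟨m', ?_, by rw [hU]; exact hinv⟩
      rw [List.foldl_cons, hstep, heq, hU]
      have hidx : m.getD p.1 0 = pvIdx (PySem.Set.update I (tr.map Prod.fst)) p.1 := by
        rw [hval p.1 hmem, PySem.Set.update_eq_append_filter]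
        exact (pvIdx_append_of_mem _ hmem).symm
      simp [hidx]
    · have hc : m.contains p.1 = false := by
        rw [PySem.Dict.contains_eq_decide_mem_keys, hkeys]; simpa
      have hstep : tm_point_step (m, I, nt)
          p = (m.insert p.1 ((I.length : Int) + 1), I ++ [p.1],
               nt ++ [((I.length : Int) + 1, p.2)]) := by
        simp [tm_point_step, hc, PySem.Dict.getD_insert_self]
      have h' := pvInv_extend ⟨hnd, hkeys, hval⟩ hmem
      obtain ⟨m', heq, hinv⟩ :=
        ih _ (I ++ [p.1]) (nt ++ [((I.length : Int) + 1, p.2)]) h'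
      have hU : PySem.Set.update I ((p :: tr).map Prod.fst)
          = PySem.Set.update (I ++ [p.1]) (tr.map Prod.fst) := by
        simp [PySem.Set.update_cons, PySem.Set.add_of_not_mem hmem]
      refine ⟨m', ?_, by rw [hU]; exact hinv⟩
      rw [List.foldl_cons, hstep, heq, hU]
      have hmem' : p.1 ∈ I ++ [p.1] := by simp
      have hidx : (I.length : Int) + 1
          = pvIdx (PySem.Set.update (I ++ [p.1]) (tr.map Prod.fst)) p.1 := by
        rw [PySem.Set.update_eq_append_filter, pvIdx_append_of_mem _ hmem']
        simp [pvIdx, List.idxOf_append, hmem]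
      simp [hidx]

theorem pv_B_outer : ∀ (traces : List (List (Int × Int))) (m : PySem.Dict Int Int)
    (I : List Int) (acc : List (List (Int × Int))), pvInv m I →
    ∃ m', traces.foldl tm_trace_step (m, I, acc) =
        (m', PySem.Set.update I ((traces.flatMap id).map Prod.fst),
         acc ++ traces.map (fun tr => tr.map (fun p =>
           (pvIdx (PySem.Set.update I ((traces.flatMap id).map Prod.fst)) p.1, p.2)))) ∧
      pvInv m' (PySem.Set.update I ((traces.flatMap id).map Prod.fst)) := by
  intro traces
  induction traces with
  | nil =>
    intro m I acc h
    exact ⟨m, by simp [PySem.Set.update_nil], by simpa [PySem.Set.update_nil] using h⟩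
  | cons tr traces ih =>
    intro m I acc h
    obtain ⟨m1, heq1, hinv1⟩ := pv_B_inner tr m I [] h
    have hstep : tm_trace_step (m, I, acc) tr
        = (m1, PySem.Set.update I (tr.map Prod.fst),
           acc ++ [tr.map (fun p =>
             (pvIdx (PySem.Set.update I (tr.map Prod.fst)) p.1, p.2))]) := by
      simp [tm_trace_step, heq1]
    obtain ⟨m', heq, hinv⟩ := ih m1 (PySem.Set.update I (tr.map Prod.fst)) _ hinv1
    have hU : PySem.Set.update I (((tr :: traces).flatMap id).map Prod.fst)
        = PySem.Set.update (PySem.Set.update I (tr.map Prod.fst))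
            ((traces.flatMap id).map Prod.fst) := by
      simp [PySem.Set.update_append]
    refine ⟨m', ?_, by rw [hU]; exact hinv⟩
    rw [List.foldl_cons, hstep, heq, hU]
    have hmap : tr.map (fun p => (pvIdx (PySem.Set.update I (tr.map Prod.fst)) p.1, p.2))
        = tr.map (fun p => (pvIdx (PySem.Set.update (PySem.Set.update I (tr.map Prod.fst))
            ((traces.flatMap id).map Prod.fst)) p.1, p.2)) := by
      apply List.map_congr_left
      intro p hp
      have hpm : p.1 ∈ PySem.Set.update I (tr.map Prod.fst) := by
        rw [PySem.Set.mem_update]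
        exact Or.inr (List.mem_map_of_mem hp)
      rw [PySem.Set.update_eq_append_filter (PySem.Set.update I (tr.map Prod.fst)),
        pvIdx_append_of_mem _ hpm]
    rw [hmap]
    simp

theorem pv_B_eq_spec (traces : List (List (Int × Int))) :
    traces_map_alt traces =
      (pvKeys traces,
       traces.map (fun tr => tr.map (fun p => (pvIdx (pvKeys traces) p.1, p.2)))) := by
  obtain ⟨m', heq, _⟩ := pv_B_outer traces PySem.Dict.empty [] [] pvInv_empty
  unfold traces_map_alt
  rw [heq]
  simp [pvKeys, PySem.Set.update_nil_left]

-- ===== VERDICT (by name: the statement is the Claim_ definition above) =====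
theorem traces_map_spec : Claim_equal_traces_map := by
  intro traces _
  unfold Spec_traces_map
  rw [pv_A_eq_spec, pv_B_eq_spec]
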